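-- pv_equiv track=rewrite | github.com/ankushgandhi1706/AI-LAB | Eight  Puzzle/EightPuzzleBFS.py | moveBlankDown
-- ===== SOURCE A (Python) =====
-- def moveBlankDown(puzzleState):
--     tempState = [[0, 0, 0], [0, 0, 0], [0, 0, 0]]
--     temp = 0
--     for row in range(3):
--         for col in range(3):
--             tempState[row][col] = puzzleState[row][col]
--
--     for row in range(3):
--         for col in range(3):
--             if tempState[row][col] == None and row != 2:
--                 temp = tempState[row + 1][col]
--                 tempState[row + 1][col] = tempState[row][col]
--                 tempState[row][col] = temp
--                 break
--
--     return tempState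
-- ===== SOURCE B (Python) =====
-- def moveBlankDown(puzzleState):
--     def sink(upper, below):
--         # upper: the current row's three cells; below: the remaining rows
--         if not below:
--             return [upper]
--         lower = [below[0][c] for c in range(3)]
--         if None in upper:
--             j = upper.index(None)
--             upper[j], lower[j] = lower[j], None
--         return [upper] + sink(lower, below[1:])
--     top, mid, bot = puzzleState[0], puzzleState[1], puzzleState[2]
--     return sink([top[c] for c in range(3)], [mid, bot])
-- ===== Notes on version B (the rewrite author's own statement) =====
-- stated objective: alternative
-- what changed: B rebuilds the grid by a pure structural recursion over the list of rows (a sink helper that swaps the first blank of the current row with the cell below it via index(None) and threads the updated lower row into the recursive call), instead of A's two passes of nested index loops mutating a 3x3 copy with a temp-variable swap and break.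
import Mathlib
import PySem

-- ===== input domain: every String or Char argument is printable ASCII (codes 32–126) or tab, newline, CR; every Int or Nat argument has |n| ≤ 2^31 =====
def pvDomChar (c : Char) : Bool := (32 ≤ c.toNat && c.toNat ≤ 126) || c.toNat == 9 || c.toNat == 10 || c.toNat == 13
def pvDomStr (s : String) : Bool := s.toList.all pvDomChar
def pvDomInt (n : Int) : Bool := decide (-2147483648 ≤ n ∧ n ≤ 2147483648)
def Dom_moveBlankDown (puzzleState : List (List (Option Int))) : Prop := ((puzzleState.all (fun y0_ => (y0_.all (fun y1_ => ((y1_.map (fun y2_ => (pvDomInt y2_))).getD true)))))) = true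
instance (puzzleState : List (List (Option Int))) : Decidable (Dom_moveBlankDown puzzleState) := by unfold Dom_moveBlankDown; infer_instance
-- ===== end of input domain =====

-- B replaces A's fixed nested index loops over a mutated 3x3 copy by a pure structural
-- recursion over the list of rows, threading each updated lower row into the recursive call
-- (objective: alternative; equivalence is about the return value — neither mutates its argument).

-- ===== PORT A =====
-- element read xs[i]: indices here come from range(3), hence nonnegative; this structural
-- lookup is exact for nonnegative in-range indices (Pre_ keeps them in range)
def pvGetAt {α : Type} (d : α) : List α → Nat → α
  | [], _ => d
  | x :: _, 0 => x
  | _ :: xs, n+1 => pvGetAt d xs n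

-- element write xs[i] = v, exact for nonnegative in-range indices (Pre_ guarantees them)
def pvSetAt {α : Type} : List α → Nat → α → List α
  | [], _, _ => []
  | _ :: xs, 0, v => v :: xs
  | x :: xs, n+1, v => x :: pvSetAt xs n v

def pvGet2 (m : List (List (Option Int))) (r c : Int) : Option Int :=
  pvGetAt none (pvGetAt [] m r.toNat) c.toNat

def pvSet2 (m : List (List (Option Int))) (r c : Int) (v : Option Int) : List (List (Option Int)) :=
  pvSetAt m r.toNat (pvSetAt (pvGetAt [] m r.toNat) c.toNat v)

-- inner 'for col in range(3): if …: swap; break' of A's second loop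
def pvInnerA (ts : List (List (Option Int))) (row : Int) : List Int → List (List (Option Int))
  | [] => ts
  | col :: rest =>
    if pvGet2 ts row col == none && !(row == 2) then
      let temp := pvGet2 ts (row + 1) col
      let ts1 := pvSet2 ts (row + 1) col (pvGet2 ts row col)
      pvSet2 ts1 row col temp
    else pvInnerA ts row rest

def moveBlankDown (puzzleState : List (List (Option Int))) : List (List (Option Int)) :=
  let tempState : List (List (Option Int)) :=
    [[some 0, some 0, some 0], [some 0, some 0, some 0], [some 0, some 0, some 0]]
  let ts1 := (PySem.List.pyRange 0 3 1).foldl (fun ts row =>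
      (PySem.List.pyRange 0 3 1).foldl (fun ts col =>
        pvSet2 ts row col (pvGet2 puzzleState row col)) ts) tempState
  (PySem.List.pyRange 0 3 1).foldl (fun ts row => pvInnerA ts row (PySem.List.pyRange 0 3 1)) ts1

-- ===== PORT B =====
-- Source B's recursive helper 'sink(upper, below)': empty below → [upper]; otherwise read the
-- row below cell by cell, swap the first blank of upper with the cell below it, and recurse
def pvSink (upper : List (Option Int)) : List (List (Option Int)) → List (List (Option Int))
  | [] => [upper]
  | b0 :: below =>
      let lower := (PySem.List.pyRange 0 3 1).map (fun c => pvGetAt none b0 c.toNat)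
      let p :=
        if upper.contains none then
          match PySem.List.index? upper none with
          | some j => (pvSetAt upper j (pvGetAt none lower j), pvSetAt lower j none)
          | none => (upper, lower)
        else (upper, lower)
      p.1 :: pvSink p.2 below

def moveBlankDown_alt (puzzleState : List (List (Option Int))) : List (List (Option Int)) :=
  let top := pvGetAt [] puzzleState 0
  let mid := pvGetAt [] puzzleState 1
  let bot := pvGetAt [] puzzleState 2
  pvSink ((PySem.List.pyRange 0 3 1).map (fun c => pvGetAt none top c.toNat)) [mid, bot]

-- ===== PRECONDITION & SPEC =====
-- Pre_: A indexes rows 0..2 and columns 0..2 of the argument, so it raises IndexError unless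
-- there are at least three rows and each of the first three rows has at least three entries.
def Pre_moveBlankDown (puzzleState : List (List (Option Int))) : Prop :=
  3 ≤ puzzleState.length ∧ ∀ r ∈ puzzleState.take 3, 3 ≤ r.length
instance (puzzleState : List (List (Option Int))) : Decidable (Pre_moveBlankDown puzzleState) := by
  unfold Pre_moveBlankDown; infer_instance

def pvWitness_moveBlankDown : List (List (Option Int)) :=
  [[some 1, none, some 2], [some 3, some 4, some 5], [some 6, some 7, some 8]]

def Spec_moveBlankDown (puzzleState : List (List (Option Int))) (out : List (List (Option Int))) : Prop := out = moveBlankDown_alt puzzleState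
instance (puzzleState : List (List (Option Int))) (out : List (List (Option Int))) : Decidable (Spec_moveBlankDown puzzleState out) := by unfold Spec_moveBlankDown; infer_instance

-- ===== CLAIM (what is proved, stated in full; the proofs are below) =====
def Claim_equal_moveBlankDown : Prop := ∀ (puzzleState : List (List (Option Int))), Dom_moveBlankDown puzzleState → Pre_moveBlankDown puzzleState → Spec_moveBlankDown puzzleState (moveBlankDown puzzleState)

-- ===== LEMMAS AND PROOFS =====

-- the first three entries of the first three rows, as a 3x3 literal
def pvM (a0 a1 a2 b0 b1 b2 c0 c1 c2 : Option Int) : List (List (Option Int)) :=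
  [[a0,a1,a2],[b0,b1,b2],[c0,c1,c2]]

-- A's 'row != 2' guard makes the row-2 scan a no-op
theorem pvInnerA_row2 (ts : List (List (Option Int))) (cols : List Int) :
    pvInnerA ts 2 cols = ts := by
  induction cols with
  | nil => rfl
  | cons c cs ih => simp [pvInnerA, ih]

theorem evalA0 (x y z u v w : Option Int) (ρ : List (Option Int)) :
    pvInnerA [[x,y,z],[u,v,w],ρ] 0 [0,1,2] =
      if x.isNone then [[u,y,z],[x,v,w],ρ]
      else if y.isNone then [[x,v,z],[u,y,w],ρ]
      else if z.isNone then [[x,y,w],[u,v,z],ρ]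
      else [[x,y,z],[u,v,w],ρ] := by
  cases x <;> cases y <;> cases z <;> rfl

theorem evalA1 (x y z u v w p q r : Option Int) :
    pvInnerA [[x,y,z],[u,v,w],[p,q,r]] 1 [0,1,2] =
      if u.isNone then [[x,y,z],[p,v,w],[u,q,r]]
      else if v.isNone then [[x,y,z],[u,q,w],[p,v,r]]
      else if w.isNone then [[x,y,z],[u,v,r],[p,q,w]]
      else [[x,y,z],[u,v,w],[p,q,r]] := by
  cases u <;> cases v <;> cases w <;> rfl

-- one unfolding of pvSink on a known upper row and a below row of ≥3 cells
theorem evalS0 (x y z u v w : Option Int) (t : List (Option Int)) (ρ : List (List (Option Int))) :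
    pvSink [x,y,z] ((u :: v :: w :: t) :: ρ) =
      if x.isNone then [u,y,z] :: pvSink [x,v,w] ρ
      else if y.isNone then [x,v,z] :: pvSink [u,y,w] ρ
      else if z.isNone then [x,y,w] :: pvSink [u,v,z] ρ
      else [x,y,z] :: pvSink [u,v,w] ρ := by
  cases x <;> cases y <;> cases z <;> rfl

set_option maxHeartbeats 2000000 in
theorem key (a0 a1 a2 b0 b1 b2 c0 c1 c2 : Option Int) (t0 t1 t2 : List (Option Int))
    (rest : List (List (Option Int))) :
    moveBlankDown ((a0 :: a1 :: a2 :: t0) :: (b0 :: b1 :: b2 :: t1) :: (c0 :: c1 :: c2 :: t2) :: rest)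
      = moveBlankDown_alt ((a0 :: a1 :: a2 :: t0) :: (b0 :: b1 :: b2 :: t1) :: (c0 :: c1 :: c2 :: t2) :: rest) := by
  have hR : PySem.List.pyRange 0 3 1 = ([0,1,2] : List Int) := rfl
  have hA : moveBlankDown ((a0 :: a1 :: a2 :: t0) :: (b0 :: b1 :: b2 :: t1) :: (c0 :: c1 :: c2 :: t2) :: rest)
      = pvInnerA (pvInnerA (pvInnerA (pvM a0 a1 a2 b0 b1 b2 c0 c1 c2) 0 [0,1,2]) 1 [0,1,2]) 2 [0,1,2] := by
    simp only [moveBlankDown, hR, List.foldl_cons, List.foldl_nil]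
    congr 1
  have hrow : ∀ (x y z : Option Int) (t : List (Option Int)),
      PySem.List.slice (x :: y :: z :: t) none (some 3) = [x,y,z] := by
    intro x y z t
    rw [show ((3:Int)) = ((3:Nat):Int) from rfl, PySem.List.slice_to_natCast]
    rfl
  have hB : moveBlankDown_alt ((a0 :: a1 :: a2 :: t0) :: (b0 :: b1 :: b2 :: t1) :: (c0 :: c1 :: c2 :: t2) :: rest)
      = pvSink [a0,a1,a2] [(b0 :: b1 :: b2 :: t1), (c0 :: c1 :: c2 :: t2)] := rfl
  rw [hA, hB, pvInnerA_row2]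
  unfold pvM
  rw [evalA0, evalS0]
  cases a0 <;> cases a1 <;> cases a2 <;>
    simp only [Option.isNone_none, Option.isNone_some, if_true, if_false, Bool.false_eq_true] <;>
    rw [evalA1, evalS0] <;>
    cases b0 <;> cases b1 <;> cases b2 <;>
    simp only [Option.isNone_none, Option.isNone_some, if_true, if_false, Bool.false_eq_true] <;> rfl

-- ===== VERDICT (by name: the statement is the Claim_ definition above) =====
theorem moveBlankDown_spec : Claim_equal_moveBlankDown := by
  intro ps _ hpre
  obtain ⟨hlen, hrows⟩ := hpre
  unfold Spec_moveBlankDown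
  match ps, hlen, hrows with
  | r0 :: r1 :: r2 :: rest, _, hrows =>
    have h0 := hrows r0 (by simp)
    have h1 := hrows r1 (by simp)
    have h2 := hrows r2 (by simp)
    match r0, h0 with
    | a0 :: a1 :: a2 :: t0, _ =>
      match r1, h1 with
      | b0 :: b1 :: b2 :: t1, _ =>
        match r2, h2 with
        | c0 :: c1 :: c2 :: t2, _ =>
          exact key a0 a1 a2 b0 b1 b2 c0 c1 c2 t0 t1 t2 rest
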